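-- pv_equiv track=rewrite | github.com/miny-genie/BOJ | acmicpc_3109.py | dfs
-- ===== SOURCE A (Python) =====
-- def dfs(row: int, depth: int, end_pos: int, pipeline: list, visited: list) -> bool:
--     if depth == end_pos:
--         return True
--
--     for dx, dy in [(-1, 1), (0, 1), (1, 1)]:
--         nx = dx + row
--         ny = dy + depth
--         if 0 <= nx < len(pipeline) and 0 <= ny < len(pipeline[0])\
--         and pipeline[nx][ny] == "." and not visited[nx][ny]:
--             visited[nx][ny] = True
--             if dfs(nx, ny, end_pos, pipeline, visited):
--                 return True
--     return False
-- ===== SOURCE B (Python) =====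
-- def dfs(row: int, depth: int, end_pos: int, pipeline: list, visited: list) -> bool:
--     # Iterative DFS with an explicit frame stack (row, depth, next-direction index);
--     # mutates `visited` exactly like the recursive version (same cells, same order).
--     dirs = [(-1, 1), (0, 1), (1, 1)]
--     stack = [[row, depth, 0]]
--     while stack:
--         r, d, i = stack[-1]
--         if d == end_pos:
--             return True
--         if i >= 3:
--             stack.pop()
--             continue
--         stack[-1][2] = i + 1
--         dx, dy = dirs[i]
--         nx, ny = dx + r, dy + d
--         if 0 <= nx < len(pipeline) and 0 <= ny < len(pipeline[0]) \
--            and pipeline[nx][ny] == "." and not visited[nx][ny]: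
--             visited[nx][ny] = True
--             stack.append([nx, ny, 0])
--     return False
-- ===== Notes on version B (the rewrite author's own statement) =====
-- stated objective: alternative
-- what changed: The recursive DFS is replaced by an explicit-stack iterative search: a stack of frames (row, depth, next-direction-index) is driven lazily one direction per visit, so no Python recursion (and no recursion-depth limit) is used; visited is mutated identically.
-- outside the precondition, e.g. on dfs(5, 0, 7, [['x', 'x'], ['x']], []): A returns False, B returns False
import Mathlib
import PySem

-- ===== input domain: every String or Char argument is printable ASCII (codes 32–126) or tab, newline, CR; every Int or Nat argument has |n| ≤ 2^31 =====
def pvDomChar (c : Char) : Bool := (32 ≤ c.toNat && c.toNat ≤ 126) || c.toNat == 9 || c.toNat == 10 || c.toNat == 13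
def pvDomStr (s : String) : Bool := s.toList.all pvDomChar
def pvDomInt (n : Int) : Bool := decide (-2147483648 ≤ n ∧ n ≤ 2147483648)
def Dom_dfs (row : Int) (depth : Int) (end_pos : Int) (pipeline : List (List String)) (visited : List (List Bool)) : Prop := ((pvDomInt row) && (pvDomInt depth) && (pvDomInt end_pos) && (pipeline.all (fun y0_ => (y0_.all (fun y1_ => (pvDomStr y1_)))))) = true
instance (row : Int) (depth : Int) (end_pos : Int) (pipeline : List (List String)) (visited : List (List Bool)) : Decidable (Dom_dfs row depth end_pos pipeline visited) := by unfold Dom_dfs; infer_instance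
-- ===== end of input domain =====

-- B rewrites the recursive DFS as an explicit-stack iterative search (alternative
-- decomposition, no speed claim); both mutate Python's `visited` identically, and the
-- equivalence proved here is about the RETURN value (the ports thread visited as state).

-- ===== PORT A =====
-- shared small helpers: the direction list, the guard of the `if`, the marking
-- `visited[nx][ny] = True`, and the count of still-unvisited cells (used as fuel).
def dfsDirs : List (Int × Int) := [(-1, 1), (0, 1), (1, 1)]

-- the Python guard `0 <= nx < len(pipeline) and 0 <= ny < len(pipeline[0]) and
-- pipeline[nx][ny] == "." and not visited[nx][ny]`; the inner reads use getD with
-- defaults ("" / visited-read defaulting to True) only to make the guard total: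
-- exact wherever the Python reads are in range (elsewhere the Python raises
-- IndexError and returns nothing).
def dfsOk (pipeline : List (List String)) (visited : List (List Bool)) (nx ny : Int) : Bool :=
  decide (0 ≤ nx) && decide (nx < (pipeline.length : Int)) &&
  decide (0 ≤ ny) && decide (ny < ((pipeline.headD []).length : Int)) &&
  ((pipeline.getD nx.toNat []).getD ny.toNat "" == ".") &&
  !((visited.getD nx.toNat []).getD ny.toNat false)

def dfsMark (visited : List (List Bool)) (nx ny : Int) : List (List Bool) :=
  visited.modify nx.toNat (fun r => r.set ny.toNat true)

def dfsCf (visited : List (List Bool)) : Nat := (visited.map (fun r => r.count false)).sum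

-- A's recursion, with the visited state threaded; fuel only makes it total
-- (none = out of fuel, never reached at the fuel dfs supplies).
mutual
def goA (fuel : Nat) (row depth end_pos : Int) (pipeline : List (List String)) (visited : List (List Bool)) : Option (Bool × List (List Bool)) :=
  match fuel with
  | 0 => none
  | f + 1 =>
    if depth = end_pos then some (true, visited)
    else loopA f dfsDirs row depth end_pos pipeline visited
termination_by (fuel, 0)

def loopA (fuel : Nat) (dirs : List (Int × Int)) (row depth end_pos : Int) (pipeline : List (List String)) (visited : List (List Bool)) : Option (Bool × List (List Bool)) :=
  match dirs with
  | [] => some (false, visited)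
  | (dx, dy) :: rest =>
    let nx := dx + row
    let ny := dy + depth
    if dfsOk pipeline visited nx ny then
      match goA fuel nx ny end_pos pipeline (dfsMark visited nx ny) with
      | none => none
      | some (true, v2) => some (true, v2)
      | some (false, v2) => loopA fuel rest row depth end_pos pipeline v2
    else loopA fuel rest row depth end_pos pipeline visited
termination_by (fuel, dirs.length + 1)
end

def dfs (row : Int) (depth : Int) (end_pos : Int) (pipeline : List (List String)) (visited : List (List Bool)) : Bool :=
  ((goA (dfsCf visited + 1) row depth end_pos pipeline visited).getD (false, visited)).1

-- ===== PORT B =====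
-- the explicit-stack machine of Source B: frames are (row, depth, next-direction index);
-- fuel only makes the while-loop total (none = out of fuel, never reached).
def goB : Nat → List (Int × Int × Nat) → Int → List (List String) → List (List Bool) → Option Bool
  | 0, _, _, _, _ => none
  | f + 1, stack, end_pos, pipeline, visited =>
    match stack with
    | [] => some false
    | (r, d, i) :: rest =>
      if d = end_pos then some true
      else if 3 ≤ i then goB f rest end_pos pipeline visited
      else
        let p := dfsDirs.getD i (0, 0)
        let nx := p.1 + r
        let ny := p.2 + d
        if dfsOk pipeline visited nx ny then
          goB f ((nx, ny, 0) :: (r, d, i + 1) :: rest) end_pos pipeline (dfsMark visited nx ny)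
        else goB f ((r, d, i + 1) :: rest) end_pos pipeline visited

def dfs_alt (row : Int) (depth : Int) (end_pos : Int) (pipeline : List (List String)) (visited : List (List Bool)) : Bool :=
  (goB (4 * dfsCf visited + 5) [(row, depth, 0)] end_pos pipeline visited).getD false

-- ===== PRECONDITION & SPEC =====
-- Pre_dfs excludes the shape-mismatched grids on which the Python can hit an
-- IndexError (a pipeline row shorter than row 0, or visited smaller than the
-- pipeline); it is a closed-form over-approximation, so it also drops some ragged
-- inputs whose search happens to die before touching the bad region and A returns.
def Pre_dfs (row : Int) (depth : Int) (end_pos : Int) (pipeline : List (List String)) (visited : List (List Bool)) : Prop :=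
  depth = end_pos ∨ depth + 1 < 0 ∨ ((pipeline.headD []).length : Int) ≤ depth + 1 ∨
  ((∀ r ∈ pipeline, (pipeline.headD []).length ≤ r.length) ∧
   pipeline.length ≤ visited.length ∧
   ∀ i < pipeline.length, (pipeline.headD []).length ≤ (visited.getD i []).length)
instance (row : Int) (depth : Int) (end_pos : Int) (pipeline : List (List String)) (visited : List (List Bool)) : Decidable (Pre_dfs row depth end_pos pipeline visited) := by unfold Pre_dfs; infer_instance

def pvWitness_dfs : Int × Int × Int × List (List String) × List (List Bool) :=
  (0, 0, 1, [[".", "."], [".", "."]], [[false, false], [false, false]])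

def Spec_dfs (row : Int) (depth : Int) (end_pos : Int) (pipeline : List (List String)) (visited : List (List Bool)) (out : Bool) : Prop := out = dfs_alt row depth end_pos pipeline visited
instance (row : Int) (depth : Int) (end_pos : Int) (pipeline : List (List String)) (visited : List (List Bool)) (out : Bool) : Decidable (Spec_dfs row depth end_pos pipeline visited out) := by unfold Spec_dfs; infer_instance

-- ===== CLAIM (what is proved, stated in full; the proofs are below) =====
def Claim_equal_dfs : Prop := ∀ (row : Int) (depth : Int) (end_pos : Int) (pipeline : List (List String)) (visited : List (List Bool)), Dom_dfs row depth end_pos pipeline visited → Pre_dfs row depth end_pos pipeline visited → Spec_dfs row depth end_pos pipeline visited (dfs row depth end_pos pipeline visited)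

-- ===== LEMMAS AND PROOFS =====

-- marking a cell the guard saw as unvisited removes exactly one `false`
lemma count_set_true (r : List Bool) (j : Nat) (h : r.getD j true = false) :
    (r.set j true).count false + 1 = r.count false := by
  induction r generalizing j with
  | nil => simp at h
  | cons a t ih =>
    cases j with
    | zero => simp_all
    | succ j =>
      have := ih j (by simpa using h)
      cases a <;> simp <;> omega

lemma dfsCf_mark (v : List (List Bool)) (nx ny : Int)
    (h : (v.getD nx.toNat []).getD ny.toNat true = false) :
    dfsCf (dfsMark v nx ny) + 1 = dfsCf v := by
  unfold dfsMark
  generalize nx.toNat = i at *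
  induction v generalizing i with
  | nil => simp at h
  | cons a t ih =>
    cases i with
    | zero =>
      simp only [List.getD, List.getElem?_cons_zero, Option.getD_some] at h
      have hc := count_set_true a ny.toNat h
      simp [dfsCf, List.modify]
      omega
    | succ i =>
      have := ih i (by simpa using h)
      simp only [dfsCf, List.map_cons, List.sum_cons, List.modify_succ_cons] at this ⊢
      omega

-- the shape of Pre_dfs that the fuel argument needs, as an invariant
def dfsShape (pl : List (List String)) (v : List (List Bool)) : Prop :=
  pl.length ≤ v.length ∧ ∀ i < pl.length, (pl.headD []).length ≤ (v.getD i []).length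

lemma dfsOk_read (pl : List (List String)) (v : List (List Bool)) (nx ny : Int)
    (hs : dfsShape pl v) (h : dfsOk pl v nx ny = true) :
    (v.getD nx.toNat []).getD ny.toNat true = false := by
  unfold dfsOk at h
  simp only [Bool.and_eq_true, decide_eq_true_eq, Bool.not_eq_true'] at h
  obtain ⟨⟨⟨⟨⟨h0, h1⟩, h2⟩, h3⟩, _⟩, hv⟩ := h
  have hrow := hs.2 nx.toNat (by omega)
  have hj : ny.toNat < (v.getD nx.toNat []).length := by omega
  rw [List.getD_eq_getElem _ _ hj] at hv ⊢
  exact hv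

lemma dfsOk_cf (pl : List (List String)) (v : List (List Bool)) (nx ny : Int)
    (hs : dfsShape pl v) (h : dfsOk pl v nx ny = true) :
    dfsCf (dfsMark v nx ny) + 1 = dfsCf v :=
  dfsCf_mark v nx ny (dfsOk_read pl v nx ny hs h)

lemma shape_mark (pl : List (List String)) (v : List (List Bool)) (nx ny : Int)
    (hs : dfsShape pl v) : dfsShape pl (dfsMark v nx ny) := by
  obtain ⟨h1, h2⟩ := hs
  refine ⟨by simpa [dfsMark] using h1, ?_⟩
  intro i hi
  have hb := h2 i hi
  by_cases hiv : i < v.length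
  · rw [List.getD_eq_getElem _ _ hiv] at hb
    rw [List.getD_eq_getElem _ _ (by simpa [dfsMark] using hiv)]
    unfold dfsMark
    rw [List.getElem_modify]
    split <;> simp_all
  · rw [List.getD_eq_default _ _ (by omega)] at hb
    rw [List.getD_eq_default _ _ (by simp [dfsMark]; omega)]
    exact hb

-- marking can only lower the count of unvisited cells (no shape needed)
lemma count_set_le (r : List Bool) (j : Nat) :
    (r.set j true).count false ≤ r.count false := by
  induction r generalizing j with
  | nil => simp
  | cons a t ih =>
    cases j with
    | zero => cases a <;> simp
    | succ j => cases a <;> simp <;> exact ih j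

lemma cf_mark_le (v : List (List Bool)) (nx ny : Int) :
    dfsCf (dfsMark v nx ny) ≤ dfsCf v := by
  unfold dfsMark
  generalize nx.toNat = i
  induction v generalizing i with
  | nil => simp
  | cons a t ih =>
    cases i with
    | zero => simp [dfsCf, List.modify, count_set_le a ny.toNat]
    | succ i =>
      have := ih i
      simp only [dfsCf, List.map_cons, List.sum_cons, List.modify_succ_cons] at this ⊢
      omega

-- ----- the recursion only marks cells: dfsCf never grows, the shape survives -----
def CfA (ep : Int) (pl : List (List String)) (f : Nat) : Prop :=
  ∀ r d v b v', goA f r d ep pl v = some (b, v') →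
    dfsCf v' ≤ dfsCf v ∧ (dfsShape pl v → dfsShape pl v')

def CfL (ep : Int) (pl : List (List String)) (f : Nat) (dirs : List (Int × Int)) : Prop :=
  ∀ r d v b v', loopA f dirs r d ep pl v = some (b, v') →
    dfsCf v' ≤ dfsCf v ∧ (dfsShape pl v → dfsShape pl v')

lemma cfLoop (ep : Int) (pl : List (List String)) (f : Nat) (hA : CfA ep pl f) :
    ∀ dirs, CfL ep pl f dirs := by
  intro dirs
  induction dirs with
  | nil =>
    intro r d v b v' h
    simp only [loopA, Option.some.injEq, Prod.mk.injEq] at h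
    simp [← h.2]
  | cons p rest ih =>
    obtain ⟨dx, dy⟩ := p
    intro r d v b v' h
    simp only [loopA] at h
    by_cases hok : dfsOk pl v (dx + r) (dy + d) = true
    · rw [if_pos hok] at h
      have hle := cf_mark_le v (dx + r) (dy + d)
      have hsm := shape_mark pl v (dx + r) (dy + d)
      cases hgo : goA f (dx + r) (dy + d) ep pl (dfsMark v (dx + r) (dy + d)) with
      | none => rw [hgo] at h; exact absurd h (by simp)
      | some p2 =>
        obtain ⟨bc, v2⟩ := p2
        rw [hgo] at h
        have h2 := hA _ _ _ _ _ hgo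
        cases bc with
        | true =>
          simp only [Option.some.injEq, Prod.mk.injEq] at h
          rw [← h.2]
          exact ⟨by omega, fun hs => h2.2 (hsm hs)⟩
        | false =>
          simp only at h
          have h3 := ih r d v2 b v' h
          exact ⟨by omega, fun hs => h3.2 (h2.2 (hsm hs))⟩
    · rw [if_neg hok] at h
      exact ih r d v b v' h

lemma cfA (ep : Int) (pl : List (List String)) : ∀ f, CfA ep pl f := by
  intro f
  induction f with
  | zero => intro r d v b v' h; simp [goA] at h
  | succ f ih =>
    intro r d v b v' h
    simp only [goA] at h
    by_cases hd : d = ep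
    · rw [if_pos hd] at h
      simp only [Option.some.injEq, Prod.mk.injEq] at h
      simp [← h.2]
    · rw [if_neg hd] at h
      exact cfLoop ep pl f ih dfsDirs r d v b v' h

-- ----- fuel sufficiency for the recursion -----
def SuffA (ep : Int) (pl : List (List String)) (f : Nat) : Prop :=
  ∀ r d v, dfsShape pl v → dfsCf v + 1 ≤ f → (goA f r d ep pl v).isSome

lemma suffLoop (ep : Int) (pl : List (List String)) (f : Nat) (hA : SuffA ep pl f) :
    ∀ dirs r d v, dfsShape pl v → dfsCf v ≤ f → (loopA f dirs r d ep pl v).isSome := by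
  intro dirs
  induction dirs with
  | nil => intro r d v _ _; simp [loopA]
  | cons p rest ih =>
    obtain ⟨dx, dy⟩ := p
    intro r d v hs hv
    simp only [loopA]
    by_cases hok : dfsOk pl v (dx + r) (dy + d) = true
    · rw [if_pos hok]
      have hcf := dfsOk_cf pl v (dx + r) (dy + d) hs hok
      have hsm := shape_mark pl v (dx + r) (dy + d) hs
      have h1 := hA (dx + r) (dy + d) (dfsMark v (dx + r) (dy + d)) hsm (by omega)
      cases hgo : goA f (dx + r) (dy + d) ep pl (dfsMark v (dx + r) (dy + d)) with
      | none => rw [hgo] at h1; simp at h1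
      | some p2 =>
        obtain ⟨bc, v2⟩ := p2
        have h2 := cfA ep pl f _ _ _ _ _ hgo
        cases bc with
        | true => simp
        | false => simpa using ih r d v2 (h2.2 hsm) (by omega)
    · rw [if_neg hok]
      exact ih r d v hs hv

lemma suffA (ep : Int) (pl : List (List String)) : ∀ f, SuffA ep pl f := by
  intro f
  induction f with
  | zero => intro r d v _ h; omega
  | succ f ih =>
    intro r d v hs hv
    simp only [goA]
    by_cases hd : d = ep
    · rw [if_pos hd]; simp
    · rw [if_neg hd]
      exact suffLoop ep pl f ih dfsDirs r d v hs (by omega)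

-- ----- fuel sufficiency for the stack machine -----
def dfsPhi (stack : List (Int × Int × Nat)) (v : List (List Bool)) : Nat :=
  (stack.map (fun fr => 4 - min fr.2.2 3)).sum + 4 * dfsCf v

lemma suffB (ep : Int) (pl : List (List String)) :
    ∀ f stack v, dfsShape pl v → dfsPhi stack v < f → (goB f stack ep pl v).isSome := by
  intro f
  induction f with
  | zero => intro stack v _ h; exact absurd h (by omega)
  | succ f ih =>
    intro stack v hs hφ
    cases stack with
    | nil => simp [goB]
    | cons fr rest =>
      obtain ⟨r, d, i⟩ := fr
      simp only [goB]
      by_cases hd : d = ep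
      · rw [if_pos hd]; simp
      · rw [if_neg hd]
        simp only [dfsPhi, List.map_cons, List.sum_cons] at hφ
        by_cases hi : 3 ≤ i
        · rw [if_pos hi]
          exact ih rest v hs (by simp only [dfsPhi]; omega)
        · rw [if_neg hi]
          by_cases hok : dfsOk pl v ((dfsDirs.getD i (0, 0)).1 + r) ((dfsDirs.getD i (0, 0)).2 + d) = true
          · simp only [hok, if_pos]
            have hcf := dfsOk_cf pl v _ _ hs hok
            exact ih _ _ (shape_mark pl v _ _ hs) (by simp only [dfsPhi, List.map_cons, List.sum_cons]; omega)
          · simp only [hok, if_neg, Bool.false_eq_true, not_false_eq_true]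
            exact ih _ _ hs (by simp only [dfsPhi, List.map_cons, List.sum_cons]; omega)

-- ----- the simulation: the stack machine computes the recursion -----
def SimP (ep : Int) (pl : List (List String)) (f : Nat) : Prop :=
  ∀ r d v b v', goA f r d ep pl v = some (b, v') →
    ∀ rest fB res, goB fB ((r, d, 0) :: rest) ep pl v = some res →
      (b = true → res = true) ∧ (b = false → ∃ g, goB g rest ep pl v' = some res)

def LoopP (ep : Int) (pl : List (List String)) (f : Nat) (dirs : List (Int × Int)) (i : Nat) : Prop :=
  ∀ r d v b v', d ≠ ep → loopA f dirs r d ep pl v = some (b, v') →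
    ∀ rest fB res, goB fB ((r, d, i) :: rest) ep pl v = some res →
      (b = true → res = true) ∧ (b = false → ∃ g, goB g rest ep pl v' = some res)

lemma loopNil (ep : Int) (pl : List (List String)) (f : Nat) : LoopP ep pl f [] 3 := by
  intro r d v b v' hd hloop rest fB res hgoB
  simp only [loopA, Option.some.injEq, Prod.mk.injEq] at hloop
  obtain ⟨hb, hv⟩ := hloop
  cases fB with
  | zero => simp [goB] at hgoB
  | succ g =>
    simp only [goB, if_neg hd, le_refl, if_pos] at hgoB
    exact ⟨fun h => by simp [← hb] at h, fun _ => ⟨g, by rw [← hv]; exact hgoB⟩⟩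

lemma loopCons (ep : Int) (pl : List (List String)) (f : Nat) (hgo : SimP ep pl f)
    (dx dy : Int) (i : Nat) (dtl : List (Int × Int))
    (hdir : dfsDirs.getD i (0, 0) = (dx, dy)) (hi : i < 3)
    (htl : LoopP ep pl f dtl (i + 1)) : LoopP ep pl f ((dx, dy) :: dtl) i := by
  intro r d v b v' hd hloop rest fB res hgoB
  simp only [loopA] at hloop
  cases fB with
  | zero => simp [goB] at hgoB
  | succ g =>
    simp only [goB, if_neg hd, if_neg (by omega : ¬ 3 ≤ i), hdir] at hgoB
    by_cases hok : dfsOk pl v (dx + r) (dy + d) = true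
    · rw [if_pos hok] at hloop
      rw [if_pos hok] at hgoB
      cases hA : goA f (dx + r) (dy + d) ep pl (dfsMark v (dx + r) (dy + d)) with
      | none => rw [hA] at hloop; exact absurd hloop (by simp)
      | some p2 =>
        obtain ⟨bc, v2⟩ := p2
        rw [hA] at hloop
        have hsim := hgo _ _ _ _ _ hA ((r, d, i + 1) :: rest) g res hgoB
        cases bc with
        | true =>
          simp only [Option.some.injEq, Prod.mk.injEq] at hloop
          obtain ⟨hb, _⟩ := hloop
          have : res = true := hsim.1 rfl
          exact ⟨fun _ => this, fun h => by simp [← hb] at h⟩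
        | false =>
          simp only at hloop
          obtain ⟨g', hg'⟩ := hsim.2 rfl
          exact htl r d v2 b v' hd hloop rest g' res hg'
    · rw [if_neg hok] at hloop
      rw [if_neg hok] at hgoB
      exact htl r d v b v' hd hloop rest g res hgoB

lemma simAll (ep : Int) (pl : List (List String)) : ∀ f, SimP ep pl f := by
  intro f
  induction f with
  | zero => intro r d v b v' h; simp [goA] at h
  | succ f ih =>
    intro r d v b v' hA rest fB res hgoB
    simp only [goA] at hA
    by_cases hd : d = ep
    · rw [if_pos hd] at hA
      simp only [Option.some.injEq, Prod.mk.injEq] at hA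
      obtain ⟨hb, _⟩ := hA
      cases fB with
      | zero => simp [goB] at hgoB
      | succ g =>
        simp only [goB, if_pos hd, Option.some.injEq] at hgoB
        exact ⟨fun _ => hgoB.symm, fun h => by simp [← hb] at h⟩
    · rw [if_neg hd] at hA
      have L2 : LoopP ep pl f [(1, 1)] 2 :=
        loopCons ep pl f ih 1 1 2 [] (by decide) (by omega) (loopNil ep pl f)
      have L1 : LoopP ep pl f [(0, 1), (1, 1)] 1 :=
        loopCons ep pl f ih 0 1 1 [(1, 1)] (by decide) (by omega) L2
      have L0 : LoopP ep pl f dfsDirs 0 :=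
        loopCons ep pl f ih (-1) 1 0 [(0, 1), (1, 1)] (by decide) (by omega) L1
      exact L0 r d v b v' hd hA rest fB res hgoB

-- ===== VERDICT (by name: the statement is the Claim_ definition above) =====
-- ----- the branches of Pre_dfs on which the search dies immediately -----
lemma okFalse (pl : List (List String)) (v : List (List Bool)) (d : Int)
    (hn : d + 1 < 0 ∨ ((pl.headD []).length : Int) ≤ d + 1) (nx : Int) :
    dfsOk pl v nx (1 + d) = false := by
  unfold dfsOk
  simp
  intros
  simp only [List.headD_eq_head?_getD] at hn
  omega

lemma goB_nil (ep : Int) (pl : List (List String)) (v : List (List Bool)) :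
    ∀ g, (goB g [] ep pl v).getD false = false := by
  intro g; cases g <;> simp [goB]

lemma goB_dead (ep : Int) (pl : List (List String)) (v : List (List Bool)) (r d : Int)
    (hd : d ≠ ep) (hz : ∀ nx, dfsOk pl v nx (1 + d) = false) :
    ∀ g (i : Nat), (goB g [(r, d, i)] ep pl v).getD false = false := by
  intro g
  induction g with
  | zero => intro i; simp [goB]
  | succ g ih =>
    intro i
    by_cases hi : 3 ≤ i
    · simp only [goB, if_neg hd, if_pos hi]
      exact goB_nil ep pl v g
    · have hdy : (dfsDirs.getD i (0, 0)).2 = 1 := by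
        interval_cases i <;> decide
      simp only [goB, if_neg hd, if_neg hi, hdy, hz, Bool.false_eq_true, if_neg,
        not_false_eq_true]
      exact ih (i + 1)

theorem dfs_spec : Claim_equal_dfs := by
  unfold Claim_equal_dfs
  intro row depth ep pl v _ hpre
  unfold Spec_dfs
  by_cases hd : depth = ep
  · unfold dfs dfs_alt
    rw [show 4 * dfsCf v + 5 = (4 * dfsCf v + 4) + 1 from by omega]
    simp [goA, goB, hd]
  · rcases hpre with hd' | hn | hn | hsh
    · exact absurd hd' hd
    · unfold dfs dfs_alt
      have hz := okFalse pl v depth (Or.inl hn)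
      rw [goB_dead ep pl v row depth hd hz (4 * dfsCf v + 5) 0]
      simp [goA, loopA, dfsDirs, hd, hz]
    · unfold dfs dfs_alt
      have hz := okFalse pl v depth (Or.inr hn)
      rw [goB_dead ep pl v row depth hd hz (4 * dfsCf v + 5) 0]
      simp [goA, loopA, dfsDirs, hd, hz]
    · have hs : dfsShape pl v := ⟨hsh.2.1, hsh.2.2⟩
      unfold dfs dfs_alt
      have hAs := suffA ep pl (dfsCf v + 1) row depth v hs (le_refl _)
      obtain ⟨pA, hA⟩ := Option.isSome_iff_exists.mp hAs
      obtain ⟨b, v'⟩ := pA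
      have hBs := suffB ep pl (4 * dfsCf v + 5) [(row, depth, 0)] v hs
        (by simp [dfsPhi]; omega)
      obtain ⟨res, hB⟩ := Option.isSome_iff_exists.mp hBs
      have hsim := simAll ep pl (dfsCf v + 1) row depth v b v' hA [] _ res hB
      rw [hA, hB]
      cases b with
      | true => simp [hsim.1 rfl]
      | false =>
        obtain ⟨g, hg⟩ := hsim.2 rfl
        cases g with
        | zero => simp [goB] at hg
        | succ g =>
          simp only [goB, Option.some.injEq] at hg
          simp [← hg]
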